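-- pv_equiv track=rewrite | github.com/Perruccio/advent-of-code | advent_of_code/year2023/day03/solution.py | get_number
-- ===== SOURCE A (Python) =====
-- def get_number(grid, r, c):
--     # start from position inside a number in the grid
--     # and expand left and right to reconstruct the whole number
--     if not (0 <= r < len(grid) and 0 <= c < len(grid[r]) and grid[r][c].isdigit()):
--         return None
--     # go left until first digit
--     res = [grid[r][c]]
--     begin = c
--     while 0 <= c-1 and grid[r][c-1].isdigit():
--         res.append(grid[r][c-1])
--         c -= 1
--     res = res[::-1]
--     # go right until finished
--     c = begin
--     while c+1 < len(grid[r]) and grid[r][c+1].isdigit():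
--         res.append(grid[r][c+1])
--         c += 1
--     return int(''.join(res))
-- ===== SOURCE B (Python) =====
-- def get_number(grid, r, c):
--     # B: one left-to-right pass over the whole row collecting maximal digit-run
--     # spans, then pick the span containing c (objective: alternative decomposition).
--     if not (0 <= r < len(grid) and 0 <= c < len(grid[r]) and grid[r][c].isdigit()):
--         return None
--     row = grid[r]
--     n = len(row)
--     spans = []
--     i = 0
--     while i < n:
--         if row[i].isdigit():
--             j = i + 1
--             while j < n and row[j].isdigit():
--                 j += 1
--             spans.append((i, j - 1))
--             i = j
--         else:
--             i += 1
--     for a, b in spans: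
--         if a <= c <= b:
--             return int(row[a:b + 1])
-- ===== Notes on version B (the rewrite author's own statement) =====
-- stated objective: alternative
-- what changed: A expands left and right from the given cell with two local while loops; B instead makes one left-to-right pass over the whole row collecting all maximal digit-run spans and then returns the number of the span containing c.
import Mathlib
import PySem

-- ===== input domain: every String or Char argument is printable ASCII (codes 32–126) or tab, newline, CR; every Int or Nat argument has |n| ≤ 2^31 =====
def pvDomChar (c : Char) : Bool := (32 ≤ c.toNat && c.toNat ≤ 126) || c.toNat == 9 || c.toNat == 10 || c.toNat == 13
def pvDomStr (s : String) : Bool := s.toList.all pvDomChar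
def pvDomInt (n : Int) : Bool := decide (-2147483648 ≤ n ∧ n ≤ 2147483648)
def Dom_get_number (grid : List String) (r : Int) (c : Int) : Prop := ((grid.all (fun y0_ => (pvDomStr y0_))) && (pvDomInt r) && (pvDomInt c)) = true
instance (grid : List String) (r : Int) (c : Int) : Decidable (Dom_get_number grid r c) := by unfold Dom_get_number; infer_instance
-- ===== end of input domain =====

-- B replaces A's two local expansions around c by one full-row pass building all maximal
-- digit-run spans and selecting the span containing c (objective: alternative decomposition).

-- ===== PORT A =====
-- left while loop: res = [grid[r][c]]; while 0 <= c-1 and grid[r][c-1].isdigit(): append, c -= 1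
def pvLeftA (row : List Char) : Nat → List Char → List Char
  | 0, res => res
  | k+1, res =>
    if PySem.Chars.isdigit (row.getD k ' ') then pvLeftA row k (res ++ [row.getD k ' ']) else res

-- right while loop: while c+1 < len(grid[r]) and grid[r][c+1].isdigit(): append, c += 1
def pvRightA (row : List Char) (c : Nat) (res : List Char) : List Char :=
  if h : c + 1 < row.length ∧ PySem.Chars.isdigit (row.getD (c+1) ' ') then
    pvRightA row (c+1) (res ++ [row.getD (c+1) ' '])
  else res
termination_by row.length - c

def get_number (grid : List String) (r : Int) (c : Int) : Option Int :=
  if ¬ (0 ≤ r ∧ r < (grid.length : Int)) then none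
  else
    let row := (grid.getD r.toNat "").toList
    if ¬ (0 ≤ c ∧ c < (row.length : Int) ∧ PySem.Chars.isdigit (row.getD c.toNat ' ')) then none
    else
      -- res[::-1] is List.reverse (PySem.List.slice?_none_none_neg_one)
      PySem.Int.ofChars?
        (pvRightA row c.toNat ((pvLeftA row c.toNat [row.getD c.toNat ' ']).reverse))

-- ===== PORT B =====
-- inner while loop of Source B: while j < n and row[j].isdigit(): j += 1
def pvScanRun (row : List Char) (j : Nat) : Nat :=
  if h : j < row.length ∧ PySem.Chars.isdigit (row.getD j ' ') then pvScanRun row (j+1)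
  else j
termination_by row.length - j

-- cited by pvBuildSpans' decreasing_by
theorem pvScanRun_ge (row : List Char) : ∀ fuel j, row.length - j ≤ fuel → j ≤ pvScanRun row j := by
  intro fuel
  induction fuel with
  | zero =>
    intro j hf
    rw [pvScanRun]
    split
    · omega
    · omega
  | succ f ih =>
    intro j hf
    rw [pvScanRun]
    split
    · rename_i h
      have := ih (j+1) (by omega)
      omega
    · omega

-- outer while loop of Source B, appending (i, j-1) spans left to right
def pvBuildSpans (row : List Char) (i : Nat) (spans : List (Nat × Nat)) : List (Nat × Nat) :=
  if h : i < row.length then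
    if PySem.Chars.isdigit (row.getD i ' ') then
      pvBuildSpans row (pvScanRun row (i+1)) (spans ++ [(i, pvScanRun row (i+1) - 1)])
    else pvBuildSpans row (i+1) spans
  else spans
termination_by row.length - i
decreasing_by
  · have := pvScanRun_ge row (row.length - (i+1)) (i+1) (by omega); omega
  · omega

-- for a, b in spans: if a <= c <= b: return …   (first match)
def pvSelect (c : Nat) : List (Nat × Nat) → Option (Nat × Nat)
  | [] => none
  | (a, b) :: rest => if a ≤ c ∧ c ≤ b then some (a, b) else pvSelect c rest

def get_number_alt (grid : List String) (r : Int) (c : Int) : Option Int :=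
  if ¬ (0 ≤ r ∧ r < (grid.length : Int)) then none
  else
    let row := (grid.getD r.toNat "").toList
    if ¬ (0 ≤ c ∧ c < (row.length : Int) ∧ PySem.Chars.isdigit (row.getD c.toNat ' ')) then none
    else
      match pvSelect c.toNat (pvBuildSpans row 0 []) with
      | some (a, b) => PySem.Int.ofChars? (PySem.List.slice row (some (a : Int)) (some ((b : Int) + 1)))
      | none => none

-- ===== PRECONDITION & SPEC =====
def Spec_get_number (grid : List String) (r : Int) (c : Int) (out : Option Int) : Prop := out = get_number_alt grid r c
instance (grid : List String) (r : Int) (c : Int) (out : Option Int) : Decidable (Spec_get_number grid r c out) := by unfold Spec_get_number; infer_instance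

-- ===== CLAIM (what is proved, stated in full; the proofs are below) =====
def Claim_equal_get_number : Prop := ∀ (grid : List String) (r : Int) (c : Int), Dom_get_number grid r c → Spec_get_number grid r c (get_number grid r c)

-- ===== LEMMAS AND PROOFS =====

theorem getElem_idx_congr {α : Type} (l : List α) {i j : Nat} (h : i = j) (hi : i < l.length) :
    l[i]'hi = l[j]'(h ▸ hi) := by subst h; rfl

theorem pvLeftA_eq (row : List Char) : ∀ (n : Nat) (res : List Char), n ≤ row.length →
    pvLeftA row n res = res ++ (row.take n).reverse.takeWhile PySem.Chars.isdigit := by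
  intro n
  induction n with
  | zero => intro res _; simp [pvLeftA]
  | succ k ih =>
    intro res hn
    have hk : k < row.length := by omega
    have hget : row.getD k ' ' = row[k] := List.getD_eq_getElem row ' ' hk
    have htake : (row.take (k+1)).reverse = row[k] :: (row.take k).reverse := by
      rw [List.take_add_one]
      simp [List.getElem?_eq_getElem hk]
    rw [pvLeftA, hget, htake, List.takeWhile_cons]
    by_cases hp : PySem.Chars.isdigit row[k]
    · rw [if_pos hp, if_pos hp, ih _ (by omega)]
      simp
    · rw [if_neg hp, if_neg hp]
      simp

theorem pvRightA_eq (row : List Char) : ∀ (fuel c : Nat) (res : List Char), row.length - c ≤ fuel →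
    pvRightA row c res = res ++ (row.drop (c+1)).takeWhile PySem.Chars.isdigit := by
  intro fuel
  induction fuel with
  | zero =>
    intro c res hf
    rw [pvRightA, dif_neg (by omega), List.drop_eq_nil_of_le (by omega : row.length ≤ c + 1)]
    simp
  | succ f ih =>
    intro c res hf
    rw [pvRightA]
    by_cases hc1 : c + 1 < row.length
    · have hget : row.getD (c+1) ' ' = row[c+1] := List.getD_eq_getElem row ' ' hc1
      have hdrop : row.drop (c+1) = row[c+1] :: row.drop (c+1+1) := List.drop_eq_getElem_cons hc1
      by_cases hp : PySem.Chars.isdigit row[c+1]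
      · rw [dif_pos ⟨hc1, by rw [hget]; exact hp⟩, hget,
          ih (c+1) (res ++ [row[c+1]]) (by omega), hdrop, List.takeWhile_cons, if_pos hp]
        simp
      · rw [dif_neg (by rw [hget]; simp [hp]), hdrop, List.takeWhile_cons, if_neg hp]
        simp
    · rw [dif_neg (by omega), List.drop_eq_nil_of_le (by omega : row.length ≤ c + 1)]
      simp

theorem pvScanRun_eq (row : List Char) : ∀ (fuel j : Nat), row.length - j ≤ fuel →
    pvScanRun row j = j + ((row.drop j).takeWhile PySem.Chars.isdigit).length := by
  intro fuel
  induction fuel with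
  | zero =>
    intro j hf
    rw [pvScanRun, dif_neg (by omega), List.drop_eq_nil_of_le (by omega : row.length ≤ j)]
    simp
  | succ f ih =>
    intro j hf
    rw [pvScanRun]
    by_cases hj : j < row.length
    · have hget : row.getD j ' ' = row[j] := List.getD_eq_getElem row ' ' hj
      have hdrop : row.drop j = row[j] :: row.drop (j+1) := List.drop_eq_getElem_cons hj
      by_cases hp : PySem.Chars.isdigit row[j]
      · rw [dif_pos ⟨hj, by rw [hget]; exact hp⟩, ih (j+1) (by omega), hdrop,
          List.takeWhile_cons, if_pos hp]
        simp
        omega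
      · rw [dif_neg (by rw [hget]; simp [hp]), hdrop, List.takeWhile_cons, if_neg hp]
        simp
    · rw [dif_neg (by omega), List.drop_eq_nil_of_le (by omega : row.length ≤ j)]
      simp

theorem takeWhile_getElem {α : Type} (q : α → Bool) :
    ∀ (l : List α) (j : Nat) (hj : j < (l.takeWhile q).length),
      q (l[j]'(lt_of_lt_of_le hj (l.takeWhile_prefix q).length_le)) = true := by
  intro l
  induction l with
  | nil => intro j hj; simp at hj
  | cons a t ih =>
    intro j hj
    by_cases hq : q a
    · simp only [List.takeWhile_cons, hq, if_true, List.length_cons] at hj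
      cases j with
      | zero => simpa using hq
      | succ j' => exact ih j' (by omega)
    · simp [List.takeWhile_cons, hq] at hj

theorem takeWhile_stop {α : Type} (q : α → Bool) :
    ∀ (l : List α) (h : (l.takeWhile q).length < l.length),
      q (l[(l.takeWhile q).length]'h) = false := by
  intro l
  induction l with
  | nil => intro h; simp at h
  | cons a t ih =>
    intro h
    by_cases hq : q a
    · simp only [List.takeWhile_cons, hq, if_true, List.length_cons] at h ⊢
      exact ih (by omega)
    · simp [List.takeWhile_cons, hq]

theorem takeWhile_length_eq {α : Type} (q : α → Bool) (l : List α) (k : Nat) (hk : k ≤ l.length)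
    (h1 : ∀ (j : Nat) (hj : j < k), q (l[j]'(by omega)) = true)
    (h2 : ∀ (h : k < l.length), q (l[k]'h) = false) :
    (l.takeWhile q).length = k := by
  rcases lt_trichotomy (l.takeWhile q).length k with h | h | h
  · have hlt : (l.takeWhile q).length < l.length := by omega
    have := takeWhile_stop q l hlt
    have := h1 (l.takeWhile q).length h
    simp_all
  · exact h
  · have := takeWhile_getElem q l k h
    have := h2 (lt_of_lt_of_le h (l.takeWhile_prefix q).length_le)
    simp_all

theorem pvScanRun_le_stop (row : List Char) : ∀ (fuel j m : Nat), m - j ≤ fuel → j ≤ m →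
    (h : m < row.length) → PySem.Chars.isdigit row[m] = false → pvScanRun row j ≤ m := by
  intro fuel
  induction fuel with
  | zero =>
    intro j m hf hjm h hm
    have hj : j = m := by omega
    subst hj
    rw [pvScanRun, dif_neg (by rw [List.getD_eq_getElem row ' ' h]; simp [hm])]
  | succ f ih =>
    intro j m hf hjm h hm
    rw [pvScanRun]
    split
    · rename_i hcond
      have hne : j ≠ m := by
        intro he; subst he
        rw [List.getD_eq_getElem row ' ' h] at hcond
        simp [hm] at hcond
      exact ih (j+1) m (by omega) (by omega) h hm
    · omega

theorem pvBuildSpans_prepend (row : List Char) : ∀ (fuel i : Nat) (s : List (Nat × Nat)),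
    row.length - i ≤ fuel → pvBuildSpans row i s = s ++ pvBuildSpans row i [] := by
  intro fuel
  induction fuel with
  | zero =>
    intro i s hf
    have hi : ¬ i < row.length := by omega
    conv_lhs => rw [pvBuildSpans]
    conv_rhs => rw [pvBuildSpans]
    rw [dif_neg hi, dif_neg hi]
    simp
  | succ f ih =>
    intro i s hf
    conv_lhs => rw [pvBuildSpans]
    conv_rhs => rw [pvBuildSpans]
    by_cases hi : i < row.length
    · rw [dif_pos hi, dif_pos hi]
      by_cases hp : PySem.Chars.isdigit (row.getD i ' ')
      · rw [if_pos hp, if_pos hp]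
        have hge := pvScanRun_ge row (row.length - (i+1)) (i+1) (by omega)
        rw [ih (pvScanRun row (i+1)) (s ++ [(i, pvScanRun row (i+1) - 1)]) (by omega),
          ih (pvScanRun row (i+1)) ([] ++ [(i, pvScanRun row (i+1) - 1)]) (by omega)]
        simp
      · rw [if_neg hp, if_neg hp]
        exact ih (i+1) s (by omega)
    · rw [dif_neg hi, dif_neg hi]
      simp

-- B-side main lemma: the span search returns exactly the run [L, R] that surrounds cn
theorem pvSelect_build (row : List Char) (cn L R : Nat)
    (hLc : L ≤ cn) (hcR : cn ≤ R) (hR : R < row.length)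
    (digAll : ∀ (j : Nat), L ≤ j → j ≤ R → (h : j < row.length) → PySem.Chars.isdigit row[j] = true)
    (leftEdge : ∀ (_ : 0 < L), PySem.Chars.isdigit (row[L-1]'(by omega)) = false)
    (rightEdge : ∀ (h : R + 1 < row.length), PySem.Chars.isdigit row[R+1] = false) :
    ∀ (fuel i : Nat), row.length - i ≤ fuel → i ≤ L →
      pvSelect cn (pvBuildSpans row i []) = some (L, R) := by
  have hscanL : pvScanRun row (L+1) = R + 1 := by
    rw [pvScanRun_eq row (row.length - (L+1)) (L+1) (by omega)]
    have hlen : (row.drop (L+1)).length = row.length - (L+1) := List.length_drop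
    have htw : ((row.drop (L+1)).takeWhile PySem.Chars.isdigit).length = R - L := by
      apply takeWhile_length_eq
      · intro j hj
        have hj2 : L + 1 + j < row.length := by omega
        have hdj : (row.drop (L+1))[j]'(by omega) = row[L+1+j]'hj2 := List.getElem_drop
        rw [hdj]
        exact digAll (L+1+j) (by omega) (by omega) hj2
      · intro h
        have hR1 : R + 1 < row.length := by omega
        have hdj : (row.drop (L+1))[R-L]'h = row[L+1+(R-L)]'(by omega) := List.getElem_drop
        rw [hdj, getElem_idx_congr row (show L+1+(R-L) = R+1 by omega)]
        exact rightEdge hR1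
      · omega
    omega
  intro fuel
  induction fuel with
  | zero => intro i hf hiL; omega
  | succ f ih =>
    intro i hf hiL
    have hi : i < row.length := by omega
    rw [pvBuildSpans, dif_pos hi]
    have hget : row.getD i ' ' = row[i] := List.getD_eq_getElem row ' ' hi
    by_cases hp : PySem.Chars.isdigit row[i]
    · rw [if_pos (by rw [hget]; exact hp)]
      by_cases hiL' : i = L
      · subst hiL'
        rw [hscanL]
        rw [pvBuildSpans_prepend row (row.length - (R+1)) (R+1) _ (by omega)]
        simp [pvSelect, hLc, hcR]
      · -- i < L : this run ends strictly before L
        have hL0 : 0 < L := by omega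
        have hndL := leftEdge hL0
        have hiL1 : i ≠ L - 1 := by
          intro he
          subst he
          simp [hndL] at hp
        have hjle : pvScanRun row (i+1) ≤ L - 1 :=
          pvScanRun_le_stop row (L - 1 - (i+1)) (i+1) (L-1) (by omega) (by omega)
            (by omega) hndL
        have hjge := pvScanRun_ge row (row.length - (i+1)) (i+1) (by omega)
        rw [pvBuildSpans_prepend row (row.length - pvScanRun row (i+1)) _ _ (by omega)]
        simp only [List.nil_append, List.cons_append, pvSelect]
        rw [if_neg (by omega)]
        exact ih (pvScanRun row (i+1)) (by omega) (by omega)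
    · rw [if_neg (by rw [hget]; exact hp)]
      have hiL' : i ≠ L := by
        intro he
        subst he
        exact hp (digAll i (by omega) (by omega) (by omega))
      exact ih (i+1) (by omega) (by omega)

-- the chunk row[L..R] decomposes as (left digits) ++ row[cn] :: (right digits)
theorem slice_chunk (row : List Char) (cn : Nat) (hc : cn < row.length) :
    (row.drop (cn - ((row.take cn).reverse.takeWhile PySem.Chars.isdigit).length)).take
        ((cn + ((row.drop (cn+1)).takeWhile PySem.Chars.isdigit).length + 1)
          - (cn - ((row.take cn).reverse.takeWhile PySem.Chars.isdigit).length)) =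
      ((row.take cn).reverse.takeWhile PySem.Chars.isdigit).reverse
        ++ row[cn] :: (row.drop (cn+1)).takeWhile PySem.Chars.isdigit := by
  set tl := (row.take cn).reverse.takeWhile PySem.Chars.isdigit with htl
  set tw := (row.drop (cn+1)).takeWhile PySem.Chars.isdigit with htw
  have hlen_take : (row.take cn).length = cn := by simp; omega
  have hk : tl.length ≤ cn := by
    have := ((row.take cn).reverse.takeWhile_prefix PySem.Chars.isdigit).length_le
    simpa [hlen_take] using this
  have hm : tw.length ≤ row.length - (cn + 1) := by
    have := ((row.drop (cn+1)).takeWhile_prefix PySem.Chars.isdigit).length_le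
    simpa using this
  have hsplit : cn + tw.length + 1 - (cn - tl.length) = (cn - (cn - tl.length)) + (tw.length + 1) := by
    omega
  rw [hsplit, List.take_add, List.drop_drop]
  have hdropcn : cn - tl.length + (cn - (cn - tl.length)) = cn := by omega
  rw [hdropcn]
  congr 1
  · -- left part
    have htl_take : tl = (row.take cn).reverse.take tl.length :=
      List.prefix_iff_eq_take.mp ((row.take cn).reverse.takeWhile_prefix _)
    have hrev : tl.reverse = (row.take cn).drop (cn - tl.length) := by
      calc tl.reverse = ((row.take cn).reverse.take tl.length).reverse := by
              conv_lhs => rw [htl_take]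
        _ = (row.take cn).drop (cn - tl.length) := by
              rw [List.take_reverse, hlen_take, List.reverse_reverse]
    rw [hrev, List.drop_take]
  · -- right part
    rw [List.drop_eq_getElem_cons hc, List.take_succ_cons]
    congr 1
    exact (List.prefix_iff_eq_take.mp ((row.drop (cn+1)).takeWhile_prefix _)).symm

-- the master equality on one row
theorem row_chunk_eq (row : List Char) (cn : Nat) (hc : cn < row.length) :
    pvRightA row cn ((pvLeftA row cn [row.getD cn ' ']).reverse) =
      PySem.List.slice row
        (some ((cn - ((row.take cn).reverse.takeWhile PySem.Chars.isdigit).length : Nat) : Int))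
        (some (((cn + ((row.drop (cn+1)).takeWhile PySem.Chars.isdigit).length : Nat) : Int) + 1)) := by
  have hget : row.getD cn ' ' = row[cn] := List.getD_eq_getElem row ' ' hc
  rw [hget, pvLeftA_eq row cn [row[cn]] (by omega),
    pvRightA_eq row (row.length - cn) cn _ (by omega)]
  have hcast : (((cn + ((row.drop (cn+1)).takeWhile PySem.Chars.isdigit).length : Nat) : Int) + 1)
      = (((cn + ((row.drop (cn+1)).takeWhile PySem.Chars.isdigit).length + 1 : Nat)) : Int) := by
    push_cast; ring
  rw [hcast, PySem.List.slice_natCast, slice_chunk row cn hc]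
  simp

-- from the guard: the run bounds L, R have the three edge properties
theorem digit_facts (row : List Char) (cn : Nat) (hc : cn < row.length)
    (hd : PySem.Chars.isdigit row[cn] = true) :
    (∀ (j : Nat), cn - ((row.take cn).reverse.takeWhile PySem.Chars.isdigit).length ≤ j →
        j ≤ cn + ((row.drop (cn+1)).takeWhile PySem.Chars.isdigit).length →
        (h : j < row.length) → PySem.Chars.isdigit row[j] = true) ∧
    (∀ (_ : 0 < cn - ((row.take cn).reverse.takeWhile PySem.Chars.isdigit).length),
        PySem.Chars.isdigit (row[cn - ((row.take cn).reverse.takeWhile PySem.Chars.isdigit).length - 1]'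
          (by omega)) = false) ∧
    (∀ (h : cn + ((row.drop (cn+1)).takeWhile PySem.Chars.isdigit).length + 1 < row.length),
        PySem.Chars.isdigit row[cn + ((row.drop (cn+1)).takeWhile PySem.Chars.isdigit).length + 1] = false) ∧
    ((row.take cn).reverse.takeWhile PySem.Chars.isdigit).length ≤ cn ∧
    cn + ((row.drop (cn+1)).takeWhile PySem.Chars.isdigit).length < row.length := by
  have hlen_take : (row.take cn).length = cn := by simp; omega
  have hlen_rev : (row.take cn).reverse.length = cn := by simp [hlen_take]
  have hk : ((row.take cn).reverse.takeWhile PySem.Chars.isdigit).length ≤ cn := by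
    have := ((row.take cn).reverse.takeWhile_prefix PySem.Chars.isdigit).length_le
    simpa [hlen_rev] using this
  have hm : ((row.drop (cn+1)).takeWhile PySem.Chars.isdigit).length ≤ row.length - (cn + 1) := by
    have := ((row.drop (cn+1)).takeWhile_prefix PySem.Chars.isdigit).length_le
    simpa using this
  have hrevElem : ∀ (i : Nat) (hi : i < cn),
      ((row.take cn).reverse[i]'(by rw [hlen_rev]; omega)) = (row[cn - 1 - i]'(by omega)) := by
    intro i hi
    rw [List.getElem_reverse, List.getElem_take]
    exact getElem_idx_congr row
      (show (row.take cn).length - 1 - i = cn - 1 - i from by rw [hlen_take])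
      (by rw [hlen_take]; omega)
  refine ⟨?_, ?_, ?_, hk, by omega⟩
  · intro j hjL hjR h
    rcases lt_trichotomy j cn with hj | hj | hj
    · have hidx : cn - 1 - j < ((row.take cn).reverse.takeWhile PySem.Chars.isdigit).length := by
        omega
      have hq := takeWhile_getElem PySem.Chars.isdigit (row.take cn).reverse (cn - 1 - j) hidx
      rw [hrevElem (cn - 1 - j) (by omega)] at hq
      rw [getElem_idx_congr row (show cn - 1 - (cn - 1 - j) = j by omega)] at hq
      exact hq
    · subst hj; exact hd
    · have hidx : j - cn - 1 < ((row.drop (cn+1)).takeWhile PySem.Chars.isdigit).length := by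
        omega
      have hq := takeWhile_getElem PySem.Chars.isdigit (row.drop (cn+1)) (j - cn - 1) hidx
      have hdj : (row.drop (cn+1))[j - cn - 1]'(lt_of_lt_of_le hidx
          ((row.drop (cn+1)).takeWhile_prefix PySem.Chars.isdigit).length_le)
          = row[cn + 1 + (j - cn - 1)]'(by omega) := List.getElem_drop
      rw [hdj, getElem_idx_congr row (show cn + 1 + (j - cn - 1) = j by omega)] at hq
      exact hq
  · intro hL0
    have hlt : ((row.take cn).reverse.takeWhile PySem.Chars.isdigit).length
        < (row.take cn).reverse.length := by omega
    have hq := takeWhile_stop PySem.Chars.isdigit (row.take cn).reverse hlt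
    rw [hrevElem ((row.take cn).reverse.takeWhile PySem.Chars.isdigit).length (by omega)] at hq
    rw [getElem_idx_congr row (show
      cn - 1 - ((row.take cn).reverse.takeWhile PySem.Chars.isdigit).length
        = cn - ((row.take cn).reverse.takeWhile PySem.Chars.isdigit).length - 1 by omega)] at hq
    exact hq
  · intro h
    have hlt : ((row.drop (cn+1)).takeWhile PySem.Chars.isdigit).length
        < (row.drop (cn+1)).length := by simp; omega
    have hq := takeWhile_stop PySem.Chars.isdigit (row.drop (cn+1)) hlt
    have hdj : (row.drop (cn+1))[((row.drop (cn+1)).takeWhile PySem.Chars.isdigit).length]'hlt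
        = row[cn + 1 + ((row.drop (cn+1)).takeWhile PySem.Chars.isdigit).length]'(by omega) :=
      List.getElem_drop
    rw [hdj, getElem_idx_congr row (show
      cn + 1 + ((row.drop (cn+1)).takeWhile PySem.Chars.isdigit).length
        = cn + ((row.drop (cn+1)).takeWhile PySem.Chars.isdigit).length + 1 by omega)] at hq
    exact hq

-- ===== VERDICT (by name: the statement is the Claim_ definition above) =====
theorem get_number_spec : Claim_equal_get_number := by
  intro grid r c _
  unfold Spec_get_number
  simp only [get_number, get_number_alt]
  by_cases hr : 0 ≤ r ∧ r < (grid.length : Int)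
  · rw [if_neg (not_not_intro hr), if_neg (not_not_intro hr)]
    set row := (grid.getD r.toNat "").toList with hrow
    by_cases hcg : 0 ≤ c ∧ c < (row.length : Int) ∧ PySem.Chars.isdigit (row.getD c.toNat ' ')
    · rw [if_neg (not_not_intro hcg), if_neg (not_not_intro hcg)]
      obtain ⟨hc0, hclen, hcd⟩ := hcg
      have hc : c.toNat < row.length := by omega
      have hd : PySem.Chars.isdigit row[c.toNat] = true := by
        rwa [List.getD_eq_getElem row ' ' hc] at hcd
      obtain ⟨digAll, leftEdge, rightEdge, hk, hRlt⟩ := digit_facts row c.toNat hc hd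
      have hsel := pvSelect_build row c.toNat
        (c.toNat - ((row.take c.toNat).reverse.takeWhile PySem.Chars.isdigit).length)
        (c.toNat + ((row.drop (c.toNat+1)).takeWhile PySem.Chars.isdigit).length)
        (by omega) (by omega) hRlt digAll leftEdge rightEdge
        row.length 0 (by omega) (by omega)
      rw [hsel, row_chunk_eq row c.toNat hc]
    · rw [if_pos hcg, if_pos hcg]
  · rw [if_pos hr, if_pos hr]
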